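-- pv_equiv track=rewrite | github.com/thomasWeise/bookbuilderpy | bookbuilderpy/versions.py | __chkstr
-- ===== SOURCE A (Python) =====
-- from typing import Final, List, Dict, Tuple, Optional
--
-- def __chkstr(n: str,
--              purge_starts: Tuple[str, ...] =
--              ("copyright", "there is no", "covered by",
--               "the lesser gnu g", "the gnu gen", "for more info",
--               "named copying", "primary author", "currently maintaine",
--               "the author", "latest sourc", "as of above",
--               "encryption notice", "the encryption", "put in the", "and, to",
--               "in both s", "the usa", "administration regulat",
--               "this is free", "warranty", "the source ", "testing/gecko",
--               "this program", "license", "you can obt", "written by",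
--               "no lsb mod", "(see the b", "bzip2 code ")) -> Optional[str]:
--     """
--     Check whether we should keep a version string.
--
--     :param n: the original string
--     :param purge_starts: the strings to purge at the start
--     :return: the string, or `None` if it can be purged
--     """
--     n = n.strip()
--     if len(n) <= 0:
--         return None
--     n = n.replace("\t", " ")
--     nlen = len(n)
--     while True:
--         n = n.replace("  ", " ")
--         nlen2 = len(n)
--         if nlen2 >= nlen:
--             break
--         nlen = nlen2
--     nl: Final[str] = n.lower()
--     if any(nl.startswith(d) for d in purge_starts):
--         return None
--     return n
-- ===== SOURCE B (Python) =====
-- from typing import Final, Optional, Tuple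
--
--
-- def __chkstr(n: str,
--              purge_starts: Tuple[str, ...] =
--              ("copyright", "there is no", "covered by",
--               "the lesser gnu g", "the gnu gen", "for more info",
--               "named copying", "primary author", "currently maintaine",
--               "the author", "latest sourc", "as of above",
--               "encryption notice", "the encryption", "put in the", "and, to",
--               "in both s", "the usa", "administration regulat",
--               "this is free", "warranty", "the source ", "testing/gecko",
--               "this program", "license", "you can obt", "written by",
--               "no lsb mod", "(see the b", "bzip2 code ")) -> Optional[str]:
--     """Single-pass variant: squeeze runs of blanks while copying once."""
--     n = n.strip()
--     if not n:
--         return None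
--     out = []
--     prev_blank = False
--     for c in n:
--         if c == " " or c == "\t":
--             if not prev_blank:
--                 out.append(" ")
--             prev_blank = True
--         else:
--             out.append(c)
--             prev_blank = False
--     n = "".join(out)
--     nl: Final[str] = n.lower()
--     for d in purge_starts:
--         if nl.startswith(d):
--             return None
--     return n
-- ===== Notes on version B (the rewrite author's own statement) =====
-- stated objective: simpler
-- what changed: A's repeated whole-string double-space-to-single-space replace loop (rescanning until the length stops shrinking) is replaced by a single left-to-right pass that copies characters while squeezing runs of blanks (space or tab) to one space, with an explicit loop for the prefix test.
import Mathlib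
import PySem

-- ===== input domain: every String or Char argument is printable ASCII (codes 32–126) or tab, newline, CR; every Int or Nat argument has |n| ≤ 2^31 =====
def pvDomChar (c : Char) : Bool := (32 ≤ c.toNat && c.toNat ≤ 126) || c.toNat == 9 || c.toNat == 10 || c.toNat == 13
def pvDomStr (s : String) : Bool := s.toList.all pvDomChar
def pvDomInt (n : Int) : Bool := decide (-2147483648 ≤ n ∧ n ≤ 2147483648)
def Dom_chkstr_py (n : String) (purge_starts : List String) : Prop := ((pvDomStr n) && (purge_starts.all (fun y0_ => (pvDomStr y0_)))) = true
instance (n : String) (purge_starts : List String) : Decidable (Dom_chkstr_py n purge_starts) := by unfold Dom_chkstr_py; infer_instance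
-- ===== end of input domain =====

-- B replaces A's repeated global '  '→' ' replace loop by one single-pass blank-squeezing
-- traversal and an explicit prefix-check loop (objective: simpler one-pass algorithm).

-- ===== PORT A =====
-- the `while True: n = n.replace("  ", " ") …` loop of A (parameter nlen is Python's `nlen`)
def collapseA (n : String) (nlen : Int) : String :=
  let n' := PySem.Str.replace n "  " " "
  let nlen2 := PySem.Str.len n'
  if nlen2 ≥ nlen then n'
  else collapseA n' nlen2
termination_by nlen.toNat
decreasing_by
  have h1 : nlen2 = PySem.Str.len (PySem.Str.replace n "  " " ") := rfl
  have h0 : (0:Int) ≤ nlen2 := by rw [h1, PySem.Str.len_eq]; exact Int.natCast_nonneg _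
  rw [← h1]
  omega

def chkstr_py (n : String) (purge_starts : List String) : Option String :=
  let n1 := PySem.Str.strip n
  if PySem.Str.len n1 ≤ 0 then none
  else
    let n2 := PySem.Str.replace n1 "\t" " "
    let n3 := collapseA n2 (PySem.Str.len n2)
    let nl := PySem.Str.lower n3
    if purge_starts.any (fun d => PySem.Str.startswith nl d) then none
    else some n3

-- ===== PORT B =====
-- the single `for c in n` squeezing pass of B (flag = Python's `prev_blank`)
def squeezeB (prev : Bool) : List Char → List Char
  | [] => []
  | c :: t =>
    if c = ' ' ∨ c = '\t' then
      (if prev then squeezeB true t else ' ' :: squeezeB true t)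
    else c :: squeezeB false t

-- the `for d in purge_starts` loop of B
def chkLoopB (nl : String) (v : String) : List String → Option String
  | [] => some v
  | d :: r => if PySem.Str.startswith nl d then none else chkLoopB nl v r

def chkstr_py_alt (n : String) (purge_starts : List String) : Option String :=
  let n1 := PySem.Str.strip n
  if n1 = "" then none
  else
    let n3 := String.ofList (squeezeB false n1.toList)
    let nl := PySem.Str.lower n3
    chkLoopB nl n3 purge_starts

-- ===== PRECONDITION & SPEC =====
def Spec_chkstr_py (n : String) (purge_starts : List String) (out : Option String) : Prop := out = chkstr_py_alt n purge_starts
instance (n : String) (purge_starts : List String) (out : Option String) : Decidable (Spec_chkstr_py n purge_starts out) := by unfold Spec_chkstr_py; infer_instance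

-- ===== CLAIM (what is proved, stated in full; the proofs are below) =====
def Claim_equal_chkstr_py : Prop := ∀ (n : String) (purge_starts : List String), Dom_chkstr_py n purge_starts → Spec_chkstr_py n purge_starts (chkstr_py n purge_starts)

-- ===== LEMMAS AND PROOFS =====

-- pure-recursion form of PySem.Chars.replace.go for old = "  ", new = " "
def grec : Nat → List Char → List Char
  | 0, l => l
  | _ + 1, [] => []
  | f + 1, c :: t =>
    if ([' ', ' '] : List Char).isPrefixOf (c :: t) then ' ' :: grec f ((c :: t).drop 2)
    else c :: grec f t

-- space-only squeeze with a previous-char-was-space flag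
def sqF (prev : Bool) : List Char → List Char
  | [] => []
  | c :: t =>
    if c = ' ' then (if prev then sqF true t else ' ' :: sqF true t)
    else c :: sqF false t

-- no two adjacent spaces
def nodbl : List Char → Bool
  | a :: b :: t => !(a = ' ' && b = ' ') && nodbl (b :: t)
  | _ => true

def tb (c : Char) : Char := if c = '\t' then ' ' else c

lemma pfx_iff (l : List Char) :
    ([' ', ' '] : List Char).isPrefixOf l = true ↔ ∃ t, l = ' ' :: ' ' :: t := by
  rw [List.isPrefixOf_iff_prefix]
  constructor
  · rintro ⟨t, ht⟩; exact ⟨t, ht.symm⟩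
  · rintro ⟨t, rfl⟩; exact ⟨t, rfl⟩

lemma go_eq (f : Nat) (l acc : List Char) :
    PySem.Chars.replace.go [' ', ' '] [' '] f l acc = acc.reverse ++ grec f l := by
  induction f generalizing l acc with
  | zero => rw [PySem.Chars.replace.go]; simp [grec]
  | succ f ih =>
    cases l with
    | nil =>
      rw [PySem.Chars.replace.go]
      simp [grec]
      omega
    | cons c t =>
      rw [PySem.Chars.replace.go]
      by_cases h : ([' ', ' '] : List Char).isPrefixOf (c :: t) = true
      · simp only [h, if_pos, grec]
        rw [ih]
        simp
      · simp only [h, grec]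
        rw [if_neg (by simp [h]), if_neg (by simp [h]), ih]
        simp

lemma rep_eq (l : List Char) :
    PySem.Chars.replace l [' ', ' '] [' '] = grec l.length l := by
  rw [PySem.Chars.replace]
  simp [go_eq]

lemma grec_len_le (f : Nat) (l : List Char) : (grec f l).length ≤ l.length := by
  induction f generalizing l with
  | zero => simp [grec]
  | succ f ih =>
    cases l with
    | nil => simp [grec]
    | cons c t =>
      rw [grec]
      split
      · next h =>
        obtain ⟨t', ht⟩ := (pfx_iff _).1 h
        cases ht
        simp only [List.length_cons]
        have := ih t'
        simp only [List.drop]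
        omega
      · simp only [List.length_cons]
        have := ih t
        omega

lemma nodbl_tail (a : Char) (t : List Char) (h : nodbl (a :: t) = true) : nodbl t = true := by
  cases t with
  | nil => simp [nodbl]
  | cons b t' => rw [nodbl] at h; simp only [Bool.and_eq_true] at h; exact h.2

lemma grec_nodbl (f : Nat) (l : List Char) (h : nodbl l = true) : grec f l = l := by
  induction f generalizing l with
  | zero => simp [grec]
  | succ f ih =>
    cases l with
    | nil => simp [grec]
    | cons c t =>
      rw [grec]
      split
      · next hp =>
        obtain ⟨t', ht⟩ := (pfx_iff _).1 hp
        cases ht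
        rw [nodbl] at h
        simp at h
      · rw [ih t (nodbl_tail c t h)]

lemma grec_shrink_or_nodbl (f : Nat) (l : List Char) (hf : l.length ≤ f) :
    (grec f l).length < l.length ∨ nodbl l = true := by
  induction f generalizing l with
  | zero =>
    cases l with
    | nil => right; simp [nodbl]
    | cons c t => simp at hf
  | succ f ih =>
    cases l with
    | nil => right; simp [nodbl]
    | cons c t =>
      rw [grec]
      by_cases hp : ([' ', ' '] : List Char).isPrefixOf (c :: t) = true
      · left
        obtain ⟨t', ht⟩ := (pfx_iff _).1 hp
        cases ht
        simp only [if_pos hp, List.length_cons, List.drop]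
        have := grec_len_le f t'
        omega
      · have hf' : t.length ≤ f := by simp at hf; omega
        rcases ih t hf' with h | h
        · left; simp only [if_neg hp, List.length_cons]; omega
        · right
          cases t with
          | nil => simp [nodbl]
          | cons b t' =>
            rw [nodbl, h]
            have : ¬(c = ' ' ∧ b = ' ') := by
              intro ⟨h1, h2⟩
              exact hp ((pfx_iff _).2 ⟨t', by simp [h1, h2]⟩)
            simp only [Bool.and_eq_true, Bool.not_and] at *
            by_cases hc : c = ' ' <;> by_cases hb : b = ' ' <;> simp_all
  
lemma sqF_cons (prev : Bool) (c : Char) (x : List Char) :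
    sqF prev (c :: x) =
      (if c = ' ' then (if prev then ([] : List Char) else [' ']) else [c]) ++ sqF (c == ' ') x := by
  by_cases hc : c = ' '
  · subst hc; cases prev <;> simp [sqF]
  · have hb : (c == ' ') = false := by simp [hc]
    cases prev <;> simp [sqF, hc, hb]

lemma sqF_grec (f : Nat) (l : List Char) (prev : Bool) :
    sqF prev (grec f l) = sqF prev l := by
  induction f generalizing l prev with
  | zero => simp [grec]
  | succ f ih =>
    cases l with
    | nil => simp [grec]
    | cons c t =>
      rw [grec]
      by_cases hp : ([' ', ' '] : List Char).isPrefixOf (c :: t) = true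
      · obtain ⟨t', ht⟩ := (pfx_iff _).1 hp
        cases ht
        simp only [if_pos hp, List.drop]
        rw [sqF_cons, sqF_cons, sqF_cons]
        simp [ih]
      · simp only [if_neg hp]
        rw [sqF_cons, sqF_cons, ih]

lemma sqF_nodbl (l : List Char) : ∀ (prev : Bool), nodbl l = true →
    (prev = true → l.head? ≠ some ' ') → sqF prev l = l := by
  induction l with
  | nil => intro prev _ _; rfl
  | cons c t ih =>
    intro prev h hh
    rw [sqF_cons]
    by_cases hc : c = ' '
    · subst hc
      have hpf : prev = false := by
        cases prev
        · rfl
        · exact absurd (by simp) (hh rfl)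
      subst hpf
      have hhead : t.head? ≠ some ' ' := by
        cases t with
        | nil => simp
        | cons b t' =>
          rw [nodbl] at h
          simp only [Bool.and_eq_true, Bool.not_and, decide_eq_true_eq] at h
          rcases h with ⟨h1, _⟩
          simp only [List.head?_cons, ne_eq, Option.some.injEq]
          intro hb
          simp [hb] at h1
      have ht : sqF true t = t := ih true (nodbl_tail _ _ h) (fun _ => hhead)
      simp [ht]
    · have ht : sqF false t = t := ih false (nodbl_tail _ _ h) (by simp)
      have hb : (c == ' ') = false := by simp [hc]
      simp [hc, hb, ht]

-- the collapse loop computes exactly the space-squeeze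
lemma collapseA_spec : ∀ (k : Nat) (s : String), s.toList.length ≤ k →
    (collapseA s (PySem.Str.len s)).toList = sqF false s.toList := by
  intro k
  induction k with
  | zero =>
    intro s hs
    have hnil : s.toList = [] := List.eq_nil_of_length_eq_zero (by omega)
    unfold collapseA
    have hrep : (PySem.Str.replace s "  " " ").toList = grec s.toList.length s.toList := by
      rw [PySem.Str.toList_replace]
      have h1 : ("  ").toList = [' ', ' '] := by decide
      have h2 : (" ").toList = [' '] := by decide
      rw [h1, h2, rep_eq]
    set n' := PySem.Str.replace s "  " " " with hn'
    show (if PySem.Str.len n' ≥ PySem.Str.len s then n'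
      else collapseA n' (PySem.Str.len n')).toList = sqF false s.toList
    have hge : PySem.Str.len n' ≥ PySem.Str.len s := by
      rw [PySem.Str.len_eq, PySem.Str.len_eq, hrep, hnil]
      simp [grec]
    rw [if_pos hge, hrep, hnil]
    simp [grec, sqF]
  | succ k ih =>
    intro s hs
    unfold collapseA
    have hrep : (PySem.Str.replace s "  " " ").toList = grec s.toList.length s.toList := by
      rw [PySem.Str.toList_replace]
      have h1 : ("  ").toList = [' ', ' '] := by decide
      have h2 : (" ").toList = [' '] := by decide
      rw [h1, h2, rep_eq]
    set n' := PySem.Str.replace s "  " " " with hn'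
    show (if PySem.Str.len n' ≥ PySem.Str.len s then n'
      else collapseA n' (PySem.Str.len n')).toList = sqF false s.toList
    by_cases hge : PySem.Str.len n' ≥ PySem.Str.len s
    · rw [if_pos hge]
      -- no shrink: the string already had no double spaces
      have hlen : s.toList.length ≤ n'.toList.length := by
        rw [PySem.Str.len_eq, PySem.Str.len_eq] at hge
        exact_mod_cast hge
      rw [hrep] at hlen
      have hnd : nodbl s.toList = true := by
        rcases grec_shrink_or_nodbl s.toList.length s.toList le_rfl with h | h
        · omega
        · exact h
      rw [hrep, grec_nodbl _ _ hnd]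
      exact (sqF_nodbl _ _ hnd (by simp)).symm
    · rw [if_neg hge]
      have hlt : n'.toList.length < s.toList.length := by
        rw [PySem.Str.len_eq, PySem.Str.len_eq] at hge
        omega
      have := ih n' (by omega)
      rw [this, hrep, sqF_grec]

-- single-char replace "\t" → " " is a map
lemma go_tab (f : Nat) (l acc : List Char) (hf : l.length ≤ f) :
    PySem.Chars.replace.go ['\t'] [' '] f l acc = acc.reverse ++ l.map tb := by
  induction f generalizing l acc with
  | zero =>
    have : l = [] := List.eq_nil_of_length_eq_zero (by omega)
    subst this
    rw [PySem.Chars.replace.go]; simp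
  | succ f ih =>
    cases l with
    | nil =>
      rw [PySem.Chars.replace.go]
      simp
      omega
    | cons c t =>
      rw [PySem.Chars.replace.go]
      have hlen : t.length ≤ f := by simp at hf; omega
      by_cases hc : c = '\t'
      · rw [if_pos (by simp [List.isPrefixOf, hc])]
        have hdrop : List.drop (['\t'] : List Char).length (c :: t) = t := by simp
        rw [hdrop, ih _ _ hlen]
        simp [tb, hc]
      · rw [if_neg (by simp [List.isPrefixOf]; exact fun h => hc h.symm), ih _ _ hlen]
        simp [tb, hc]

lemma rep_tab (s : String) :
    (PySem.Str.replace s "\t" " ").toList = s.toList.map tb := by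
  rw [PySem.Str.toList_replace]
  have h1 : ("\t").toList = ['\t'] := by decide
  have h2 : (" ").toList = [' '] := by decide
  rw [h1, h2, PySem.Chars.replace]
  rw [if_neg (by simp)]
  rw [go_tab _ _ _ le_rfl]
  simp

lemma squeezeB_eq_sqF (l : List Char) (prev : Bool) :
    squeezeB prev l = sqF prev (l.map tb) := by
  induction l generalizing prev with
  | nil => rfl
  | cons c t ih =>
    rw [squeezeB]
    by_cases hc : c = ' ' ∨ c = '\t'
    · rw [if_pos hc]
      have htb : tb c = ' ' := by rcases hc with h | h <;> simp [tb, h]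
      simp only [List.map_cons, htb]
      rw [sqF, if_pos rfl]
      cases prev <;> simp [ih]
    · rw [if_neg hc]
      push_neg at hc
      have htb : tb c = c := by simp [tb, hc.2]
      simp only [List.map_cons, htb]
      rw [sqF, if_neg hc.1, ih]

lemma chkLoopB_eq (nl v : String) (ps : List String) :
    chkLoopB nl v ps = if ps.any (fun d => PySem.Str.startswith nl d) then none else some v := by
  induction ps with
  | nil => simp [chkLoopB]
  | cons d r ih =>
    rw [chkLoopB, ih]
    simp only [List.any_cons, Bool.or_eq_true]
    split_ifs <;> tauto

-- ===== VERDICT (by name: the statement is the Claim_ definition above) =====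
theorem chkstr_py_spec : Claim_equal_chkstr_py := by
  intro n purge_starts _
  unfold Spec_chkstr_py chkstr_py chkstr_py_alt
  set n1 := PySem.Str.strip n with hn1
  by_cases hemp : n1 = ""
  · have : PySem.Str.len n1 ≤ 0 := by rw [hemp]; decide
    simp [this, hemp]
  · have hlen : ¬ PySem.Str.len n1 ≤ 0 := by
      rw [PySem.Str.len_eq]
      have : n1.toList ≠ [] := by
        intro h
        exact hemp (String.toList_inj.mp (by simp [h]))
      have : 0 < n1.toList.length := List.length_pos_of_ne_nil this
      push_cast
      omega
    simp only [if_neg hlen, if_neg hemp]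
    have hmain : (collapseA (PySem.Str.replace n1 "\t" " ")
        (PySem.Str.len (PySem.Str.replace n1 "\t" " "))).toList
        = squeezeB false n1.toList := by
      rw [collapseA_spec (PySem.Str.replace n1 "\t" " ").toList.length _ le_rfl]
      rw [rep_tab, squeezeB_eq_sqF]
    have hstr : collapseA (PySem.Str.replace n1 "\t" " ")
        (PySem.Str.len (PySem.Str.replace n1 "\t" " "))
        = String.ofList (squeezeB false n1.toList) := by
      apply String.toList_inj.mp
      rw [hmain, String.toList_ofList]
    rw [hstr, chkLoopB_eq]
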